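-- pv_equiv track=rewrite | github.com/erickborja26/Analitica-de-Datos | PC3/app.py | _split_nombre_modelo
-- ===== SOURCE A (Python) =====
-- POLS = ["PM2_5", "PM10", "SO2", "NO2", "O3", "CO"]
--
-- def _split_nombre_modelo(base: str):
--     for pol in POLS:
--         suf = f"_{pol}_next_hour"
--         if base.endswith(suf):
--             algoritmo = base[: -len(suf)]
--             if algoritmo.endswith("_"):
--                 algoritmo = algoritmo[:-1]
--             return algoritmo, f"{pol}_next_hour"
--     return None, None
-- ===== SOURCE B (Python) =====
-- # Suffix-table lookup: precompute a dict of the six full model suffixes and try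
-- # the (four distinct) suffix lengths, longest first, with one exact hash lookup
-- # each -- no per-pollutant endswith scan.
--
-- POLS = ["PM2_5", "PM10", "SO2", "NO2", "O3", "CO"]
--
-- _SUF_TO_POL = {f"_{p}_next_hour": p for p in POLS}
-- _SUF_LENS = sorted({len(s) for s in _SUF_TO_POL}, reverse=True)
--
-- def _split_nombre_modelo(base):
--     for n in _SUF_LENS:
--         pol = _SUF_TO_POL.get(base[-n:])
--         if pol is not None:
--             return base[:-n].removesuffix("_"), f"{pol}_next_hour"
--     return None, None
-- ===== Notes on version B (the rewrite author's own statement) =====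
-- stated objective: alternative
-- what changed: B replaces A's loop over pollutants that rebuilds and endswith-scans a composed suffix per pollutant by a precomputed suffix->pollutant dict tried at the four distinct suffix lengths (longest first) with one exact hash lookup each.
import Mathlib
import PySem

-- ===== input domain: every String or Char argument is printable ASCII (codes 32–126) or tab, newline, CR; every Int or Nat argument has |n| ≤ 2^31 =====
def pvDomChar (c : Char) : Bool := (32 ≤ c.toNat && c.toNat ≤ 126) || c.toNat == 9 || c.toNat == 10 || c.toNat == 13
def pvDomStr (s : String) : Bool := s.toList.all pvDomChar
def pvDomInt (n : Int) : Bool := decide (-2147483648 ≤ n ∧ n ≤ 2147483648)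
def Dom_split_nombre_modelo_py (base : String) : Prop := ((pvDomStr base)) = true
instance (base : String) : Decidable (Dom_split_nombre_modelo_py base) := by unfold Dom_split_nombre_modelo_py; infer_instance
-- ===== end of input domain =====

-- B replaces A's per-pollutant endswith loop by a precomputed suffix->pollutant
-- dict probed at the four distinct suffix lengths; alternative decomposition,
-- same cost, return value proved identical on all inputs.


-- "_next_hour" as a char list (f-strings are ported as list appends)
def pvNH : List Char := ['_', 'n', 'e', 'x', 't', '_', 'h', 'o', 'u', 'r']

-- POLS = ["PM2_5", "PM10", "SO2", "NO2", "O3", "CO"]  (module constant, shared)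
def pvPols : List (List Char) :=
  [['P','M','2','_','5'], ['P','M','1','0'], ['S','O','2'], ['N','O','2'], ['O','3'], ['C','O']]

-- ===== PORT A =====
-- the 'for pol in POLS' loop of A, with early return
def pvLoopA (cs : List Char) : List (List Char) → Option String × Option String
  | [] => (none, none)
  | pol :: rest =>
    let suf : List Char := '_' :: (pol ++ pvNH)            -- f"_{pol}_next_hour"
    if PySem.Chars.endswith cs suf then
      let a := PySem.List.slice cs none (some (-(suf.length : Int)))   -- base[: -len(suf)]
      let a' := if PySem.Chars.endswith a ['_'] then PySem.List.slice a none (some (-1)) else a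
      (some (String.ofList a'), some (String.ofList (pol ++ pvNH)))            -- f"{pol}_next_hour"
    else pvLoopA cs rest

def split_nombre_modelo_py (base : String) : Option String × Option String :=
  pvLoopA base.toList pvPols

-- ===== PORT B =====
-- _SUF_TO_POL = {f"_{p}_next_hour": p for p in POLS}
def pvSufDict : PySem.Dict (List Char) (List Char) :=
  PySem.Dict.ofList (pvPols.map (fun p => ('_' :: (p ++ pvNH), p)))

-- _SUF_LENS = sorted({len(s) for s in _SUF_TO_POL}, reverse=True)
def pvSufLens : List Int :=
  PySem.List.sorted (PySem.Set.ofList ((PySem.Dict.keys pvSufDict).map (fun s => (s.length : Int)))) (fun x => x) true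

-- s.removesuffix("_") : exact hand port (drop the suffix once if present)
def pvRemoveSuffix (l : List Char) : List Char :=
  if PySem.Chars.endswith l ['_'] then l.dropLast else l

-- the 'for n in _SUF_LENS' loop of B, with early return
def pvLoopB (cs : List Char) : List Int → Option String × Option String
  | [] => (none, none)
  | n :: rest =>
    match PySem.Dict.get? pvSufDict (PySem.List.slice cs (some (-n)) none) with  -- _SUF_TO_POL.get(base[-n:])
    | some pol =>
        (some (String.ofList (pvRemoveSuffix (PySem.List.slice cs none (some (-n))))),  -- base[:-n].removesuffix("_")
         some (String.ofList (pol ++ pvNH)))                                            -- f"{pol}_next_hour"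
    | none => pvLoopB cs rest

def split_nombre_modelo_py_alt (base : String) : Option String × Option String :=
  pvLoopB base.toList pvSufLens

-- ===== PRECONDITION & SPEC =====
def Spec_split_nombre_modelo_py (base : String) (out : Option String × Option String) : Prop := out = split_nombre_modelo_py_alt base
instance (base : String) (out : Option String × Option String) : Decidable (Spec_split_nombre_modelo_py base out) := by unfold Spec_split_nombre_modelo_py; infer_instance

-- ===== CLAIM (what is proved, stated in full; the proofs are below) =====
def Claim_equal_split_nombre_modelo_py : Prop := ∀ (base : String), Dom_split_nombre_modelo_py base → Spec_split_nombre_modelo_py base (split_nombre_modelo_py base)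

-- ===== LEMMAS AND PROOFS =====

-- the six full suffixes (proof helper)
def pvKeys : List (List Char) := pvPols.map (fun p => '_' :: (p ++ pvNH))

lemma pv_lens : pvSufLens = [16, 15, 14, 13] := by decide

lemma pv_keys_cmp : ∀ k1 ∈ pvKeys, ∀ k2 ∈ pvKeys, k1 <:+ k2 → k1 = k2 := by decide

lemma pv_keys_dict : PySem.Dict.keys pvSufDict = pvKeys := by decide

lemma pv_get?_none (x : List Char) (h : x ∉ pvKeys) : PySem.Dict.get? pvSufDict x = none :=
  (PySem.Dict.get?_eq_none_iff_not_mem_keys _ _).mpr (by rw [pv_keys_dict]; exact h)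

lemma pv_slice_negInt (cs : List Char) (n : Int) (hn : 0 < n) :
    PySem.List.slice cs (some (-n)) none = cs.drop (cs.length - n.toNat) := by
  obtain ⟨m, rfl⟩ : ∃ m : Nat, n = (m : Int) := ⟨n.toNat, (Int.toNat_of_nonneg hn.le).symm⟩
  rw [PySem.List.slice_from_neg_natCast cs m (by exact_mod_cast hn)]
  simp

lemma pv_slice_to_negInt (cs : List Char) (n : Int) (hn : 0 < n) :
    PySem.List.slice cs none (some (-n)) = cs.take (cs.length - n.toNat) := by
  obtain ⟨m, rfl⟩ : ∃ m : Nat, n = (m : Int) := ⟨n.toNat, (Int.toNat_of_nonneg hn.le).symm⟩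
  rw [PySem.List.slice_to_neg_natCast cs m (by exact_mod_cast hn)]
  simp

lemma pvLoopB_skip (cs : List Char) (n : Int) (rest : List Int)
    (h : PySem.Dict.get? pvSufDict (PySem.List.slice cs (some (-n)) none) = none) :
    pvLoopB cs (n :: rest) = pvLoopB cs rest := by
  simp [pvLoopB, h]

lemma pv_step_skip (t k : List Char) (hk : k ∈ pvKeys) (n : Int) (hn : 0 < n)
    (hne : n ≠ (k.length : Int)) (ht : t ≠ []) (rest : List Int) :
    pvLoopB (t ++ k) (n :: rest) = pvLoopB (t ++ k) rest := by
  apply pvLoopB_skip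
  rw [pv_slice_negInt _ _ hn]
  apply pv_get?_none
  intro hmem
  have hsuf : (t ++ k).drop ((t ++ k).length - n.toNat) <:+ (t ++ k) := List.drop_suffix _ _
  have hksuf : k <:+ (t ++ k) := ⟨t, rfl⟩
  have heq : (t ++ k).drop ((t ++ k).length - n.toNat) = k := by
    rcases List.suffix_or_suffix_of_suffix hsuf hksuf with h' | h'
    · exact pv_keys_cmp _ hmem _ hk h'
    · exact (pv_keys_cmp _ hk _ hmem h').symm
  have hlen := congrArg List.length heq
  have htl : 0 < t.length := List.length_pos_iff.mpr ht
  simp [List.length_drop, List.length_append] at hlen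
  omega

lemma pv_step_fire (t k pol : List Char) (hkp : PySem.Dict.get? pvSufDict k = some pol)
    (hlen : 0 < k.length) (n : Int) (hn : n = (k.length : Int)) (rest : List Int) :
    pvLoopB (t ++ k) (n :: rest) =
      (some (String.ofList (pvRemoveSuffix t)), some (String.ofList (pol ++ pvNH))) := by
  subst hn
  have hpos : (0 : Int) < (k.length : Int) := by exact_mod_cast hlen
  have hidx : (t ++ k).length - ((k.length : Int)).toNat = t.length := by
    simp [List.length_append]
  have h1 : PySem.List.slice (t ++ k) (some (-(k.length : Int))) none = k := by
    rw [pv_slice_negInt _ _ hpos, hidx, List.drop_left]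
  have h2 : PySem.List.slice (t ++ k) none (some (-(k.length : Int))) = t := by
    rw [pv_slice_to_negInt _ _ hpos, hidx, List.take_left]
  simp [pvLoopB, h1, hkp, h2]

lemma pv_step_none (cs : List Char) (n : Int) (hn : 0 < n)
    (h : ∀ k ∈ pvKeys, ¬ PySem.Chars.endswith cs k = true) (rest : List Int) :
    pvLoopB cs (n :: rest) = pvLoopB cs rest := by
  apply pvLoopB_skip
  rw [pv_slice_negInt _ _ hn]
  apply pv_get?_none
  intro hmem
  exact h _ hmem (by rw [PySem.Chars.endswith_iff]; exact List.drop_suffix _ _)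

lemma pvA_nil (cs : List Char) : pvLoopA cs [] = (none, none) := by
  simp [pvLoopA]

lemma pvA_skip (cs pol : List Char) (rest : List (List Char))
    (h : ¬ PySem.Chars.endswith cs ('_' :: (pol ++ pvNH)) = true) :
    pvLoopA cs (pol :: rest) = pvLoopA cs rest := by
  simp only [pvLoopA]
  rw [if_neg h]

lemma pv_slice_cut (t s : List Char) (h : 0 < s.length) :
    PySem.List.slice (t ++ s) none (some (-(s.length : Int))) = t := by
  rw [PySem.List.slice_to_neg_natCast _ _ h]
  simp

lemma pvA_fire (pol t : List Char) (rest : List (List Char)) :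
    pvLoopA (t ++ ('_' :: (pol ++ pvNH))) (pol :: rest) =
      (some (String.ofList (pvRemoveSuffix t)), some (String.ofList (pol ++ pvNH))) := by
  have hend : PySem.Chars.endswith (t ++ ('_' :: (pol ++ pvNH))) ('_' :: (pol ++ pvNH)) = true := by
    rw [PySem.Chars.endswith_iff]; exact ⟨t, rfl⟩
  have hcut : PySem.List.slice (t ++ ('_' :: (pol ++ pvNH))) none
      (some (-((('_' :: (pol ++ pvNH))).length : Int))) = t := pv_slice_cut _ _ (by simp)
  simp only [pvLoopA]
  rw [if_pos hend, hcut, PySem.List.slice_to_neg_one, pvRemoveSuffix]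

lemma pv_main (l : List Char) : pvLoopA l pvPols = pvLoopB l pvSufLens := by
  rw [pv_lens]
  unfold pvPols
  by_cases h1 : PySem.Chars.endswith l ('_' :: (['P','M','2','_','5'] ++ pvNH)) = true
  case pos =>
    rw [PySem.Chars.endswith_iff] at h1
    obtain ⟨t, rfl⟩ := h1
    rw [pvA_fire]
    rw [pv_step_fire t _ ['P','M','2','_','5'] (by decide) (by decide) 16 (by decide)]
  by_cases h2 : PySem.Chars.endswith l ('_' :: (['P','M','1','0'] ++ pvNH)) = true
  case pos =>
    rw [PySem.Chars.endswith_iff] at h2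
    obtain ⟨t, rfl⟩ := h2
    by_cases ht : t = []
    · subst ht; simp only [List.nil_append]; rw [← pv_lens]; decide
    · rw [pvA_skip _ _ _ h1]
      rw [pvA_fire]
      rw [pv_step_skip t _ (by decide) 16 (by decide) (by decide) ht]
      rw [pv_step_fire t _ ['P','M','1','0'] (by decide) (by decide) 15 (by decide)]
  by_cases h3 : PySem.Chars.endswith l ('_' :: (['S','O','2'] ++ pvNH)) = true
  case pos =>
    rw [PySem.Chars.endswith_iff] at h3
    obtain ⟨t, rfl⟩ := h3
    by_cases ht : t = []
    · subst ht; simp only [List.nil_append]; rw [← pv_lens]; decide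
    · rw [pvA_skip _ _ _ h1, pvA_skip _ _ _ h2]
      rw [pvA_fire]
      rw [pv_step_skip t _ (by decide) 16 (by decide) (by decide) ht]
      rw [pv_step_skip t _ (by decide) 15 (by decide) (by decide) ht]
      rw [pv_step_fire t _ ['S','O','2'] (by decide) (by decide) 14 (by decide)]
  by_cases h4 : PySem.Chars.endswith l ('_' :: (['N','O','2'] ++ pvNH)) = true
  case pos =>
    rw [PySem.Chars.endswith_iff] at h4
    obtain ⟨t, rfl⟩ := h4
    by_cases ht : t = []
    · subst ht; simp only [List.nil_append]; rw [← pv_lens]; decide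
    · rw [pvA_skip _ _ _ h1, pvA_skip _ _ _ h2, pvA_skip _ _ _ h3]
      rw [pvA_fire]
      rw [pv_step_skip t _ (by decide) 16 (by decide) (by decide) ht]
      rw [pv_step_skip t _ (by decide) 15 (by decide) (by decide) ht]
      rw [pv_step_fire t _ ['N','O','2'] (by decide) (by decide) 14 (by decide)]
  by_cases h5 : PySem.Chars.endswith l ('_' :: (['O','3'] ++ pvNH)) = true
  case pos =>
    rw [PySem.Chars.endswith_iff] at h5
    obtain ⟨t, rfl⟩ := h5
    by_cases ht : t = []
    · subst ht; simp only [List.nil_append]; rw [← pv_lens]; decide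
    · rw [pvA_skip _ _ _ h1, pvA_skip _ _ _ h2, pvA_skip _ _ _ h3, pvA_skip _ _ _ h4]
      rw [pvA_fire]
      rw [pv_step_skip t _ (by decide) 16 (by decide) (by decide) ht]
      rw [pv_step_skip t _ (by decide) 15 (by decide) (by decide) ht]
      rw [pv_step_skip t _ (by decide) 14 (by decide) (by decide) ht]
      rw [pv_step_fire t _ ['O','3'] (by decide) (by decide) 13 (by decide)]
  by_cases h6 : PySem.Chars.endswith l ('_' :: (['C','O'] ++ pvNH)) = true
  case pos =>
    rw [PySem.Chars.endswith_iff] at h6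
    obtain ⟨t, rfl⟩ := h6
    by_cases ht : t = []
    · subst ht; simp only [List.nil_append]; rw [← pv_lens]; decide
    · rw [pvA_skip _ _ _ h1, pvA_skip _ _ _ h2, pvA_skip _ _ _ h3, pvA_skip _ _ _ h4,
          pvA_skip _ _ _ h5]
      rw [pvA_fire]
      rw [pv_step_skip t _ (by decide) 16 (by decide) (by decide) ht]
      rw [pv_step_skip t _ (by decide) 15 (by decide) (by decide) ht]
      rw [pv_step_skip t _ (by decide) 14 (by decide) (by decide) ht]
      rw [pv_step_fire t _ ['C','O'] (by decide) (by decide) 13 (by decide)]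
  have hall : ∀ k ∈ pvKeys, ¬ PySem.Chars.endswith l k = true := by
    intro k hk
    simp only [pvKeys, pvPols, List.map, List.mem_cons, List.not_mem_nil, or_false] at hk
    rcases hk with rfl | rfl | rfl | rfl | rfl | rfl
    · exact h1
    · exact h2
    · exact h3
    · exact h4
    · exact h5
    · exact h6
  rw [pvA_skip _ _ _ h1, pvA_skip _ _ _ h2, pvA_skip _ _ _ h3, pvA_skip _ _ _ h4,
      pvA_skip _ _ _ h5, pvA_skip _ _ _ h6, pvA_nil]
  rw [pv_step_none _ 16 (by decide) hall, pv_step_none _ 15 (by decide) hall,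
      pv_step_none _ 14 (by decide) hall, pv_step_none _ 13 (by decide) hall]
  rfl

-- ===== VERDICT (by name: the statement is the Claim_ definition above) =====
theorem split_nombre_modelo_py_spec : Claim_equal_split_nombre_modelo_py := by
  intro base _
  unfold Spec_split_nombre_modelo_py split_nombre_modelo_py split_nombre_modelo_py_alt
  exact pv_main base.toList
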